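-- pv_equiv track=rewrite | github.com/yufoxda/atcoder | 415/correct_solution.py | solve_medicine
-- ===== SOURCE A (Python) =====
-- def solve_medicine(n, s):
--     """
--     正しいアルゴリズム: DFSで安全な経路を探索
--     """
--     target = (1 << n) - 1  # 全ての薬品が混ざった状態
--
--     def dfs(state):
--         if state == target:
--             return True
--
--         # 各薬品を追加してみる
--         for i in range(n):
--             if not (state & (1 << i)):  # 薬品i+1がまだ混ざっていない
--                 new_state = state | (1 << i)
--                 # 新しい状態が安全かチェック (1-indexed)
--                 if new_state <= len(s) and s[new_state - 1] == '0':
--                     if dfs(new_state):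
--                         return True
--
--         return False
--
--     return dfs(0)
-- ===== SOURCE B (Python) =====
-- def solve_medicine(n, s):
--     """Layered BFS/DP over bitmask states (one frontier per popcount layer)."""
--     target = (1 << n) - 1
--     safe = {v + 1 for v in range(len(s)) if s[v] == '0'}
--     layer = {0}
--     for _ in range(n):
--         if target in layer:
--             return True
--         layer = {u | (1 << i) for u in layer for i in range(n)
--                  if not u & (1 << i) and (u | (1 << i)) in safe}
--     return target in layer
-- ===== Notes on version B (the rewrite author's own statement) =====
-- stated objective: alternative
-- what changed: Replaced A's unmemoized recursive DFS over all mixing orders by an iterative layered BFS/DP: a precomputed set of safe states and one frontier set per popcount layer, so each reachable state is processed once per layer instead of once per path.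
import Mathlib
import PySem

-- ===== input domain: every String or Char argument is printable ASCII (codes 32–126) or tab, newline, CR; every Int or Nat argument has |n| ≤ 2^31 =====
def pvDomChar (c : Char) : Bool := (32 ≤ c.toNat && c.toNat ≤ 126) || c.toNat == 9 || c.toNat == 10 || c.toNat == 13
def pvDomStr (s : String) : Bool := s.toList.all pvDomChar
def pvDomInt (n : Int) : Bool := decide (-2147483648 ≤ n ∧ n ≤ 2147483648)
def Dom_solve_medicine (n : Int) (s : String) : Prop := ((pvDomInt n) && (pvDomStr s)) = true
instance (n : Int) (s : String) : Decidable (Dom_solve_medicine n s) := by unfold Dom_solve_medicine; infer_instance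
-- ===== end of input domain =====

-- B replaces A's unmemoized depth-first search by a layered breadth-first sweep over bitmask
-- states (each layer = the states with one more medicine mixed), visiting each state once per layer.

-- ===== PORT A =====
-- A's safety test: `new_state <= len(s) and s[new_state - 1] == '0'`
def pvSafeA (s : String) (v : Int) : Bool :=
  decide (v ≤ PySem.Str.len s) && (PySem.Str.pyGet? s (v - 1) == some '0')

-- A's inner `dfs`; the fuel is the recursion-depth bound n (each call sets one more of the
-- n low bits, so with fuel n the base case is reached only when state = target, where it
-- returns `state == target` exactly as Python's first line does).
def pvDfsA (nn : Nat) (tgt : Int) (s : String) : Nat → Int → Bool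
  | 0, state => state == tgt
  | f + 1, state =>
    if state == tgt then true
    else
      (List.range nn).any (fun (i : Nat) =>
        if PySem.Int.band state ((1 : Int) <<< i) == 0 then
          if pvSafeA s (PySem.Int.bor state ((1 : Int) <<< i)) then
            pvDfsA nn tgt s f (PySem.Int.bor state ((1 : Int) <<< i))
          else false
        else false)

def solve_medicine (n : Int) (s : String) : Bool :=
  let tgt : Int := ((1 : Int) <<< n.toNat) - 1
  pvDfsA n.toNat tgt s n.toNat 0

-- ===== PORT B =====
-- B's safe-state set: {v + 1 for v in range(len(s)) if s[v] == '0'}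
def pvSafeSet (s : String) : PySem.Set Int :=
  PySem.Set.ofList
    ((List.range (PySem.Str.len s).toNat).filterMap (fun (v : Nat) =>
      if PySem.Str.pyGet? s (v : Int) == some '0' then some ((v : Int) + 1) else none))

-- one BFS layer: {u | (1 << i) for u in layer for i in range(n) if not u & (1 << i) and (u | (1 << i)) in safe}
def pvNext (nn : Nat) (safe : PySem.Set Int) (layer : PySem.Set Int) : PySem.Set Int :=
  PySem.Set.ofList
    (layer.flatMap (fun (u : Int) =>
      (List.range nn).filterMap (fun (i : Nat) =>
        if (PySem.Int.band u ((1 : Int) <<< i) == 0)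
            && PySem.Set.contains safe (PySem.Int.bor u ((1 : Int) <<< i)) then
          some (PySem.Int.bor u ((1 : Int) <<< i))
        else none)))

-- B's `for _ in range(n)` loop with its early `return True`
def pvBLoop (nn : Nat) (tgt : Int) (safe : PySem.Set Int) : Nat → PySem.Set Int → Bool
  | 0, layer => PySem.Set.contains layer tgt
  | f + 1, layer =>
    if PySem.Set.contains layer tgt then true
    else pvBLoop nn tgt safe f (pvNext nn safe layer)

def solve_medicine_alt (n : Int) (s : String) : Bool :=
  let tgt : Int := ((1 : Int) <<< n.toNat) - 1
  pvBLoop n.toNat tgt (pvSafeSet s) n.toNat (PySem.Set.ofList [0])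

-- ===== PRECONDITION & SPEC =====
-- Python's `1 << n` raises ValueError for n < 0, so A (and B) return only for 0 ≤ n.
def Pre_solve_medicine (n : Int) (_s : String) : Prop := 0 ≤ n
instance (n : Int) (s : String) : Decidable (Pre_solve_medicine n s) := by
  unfold Pre_solve_medicine; infer_instance

def pvWitness_solve_medicine : Int × String := (2, "00")

def Spec_solve_medicine (n : Int) (s : String) (out : Bool) : Prop := out = solve_medicine_alt n s
instance (n : Int) (s : String) (out : Bool) : Decidable (Spec_solve_medicine n s out) := by
  unfold Spec_solve_medicine; infer_instance

-- ===== CLAIM (what is proved, stated in full; the proofs are below) =====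
def Claim_equal_solve_medicine : Prop := ∀ (n : Int) (s : String), Dom_solve_medicine n s → Pre_solve_medicine n s → Spec_solve_medicine n s (solve_medicine n s)

-- ===== LEMMAS AND PROOFS =====

-- one safe mixing step: set an unset bit i < nn, landing on a state A's safety test accepts
def pvStep (nn : Nat) (s : String) (u v : Int) : Prop :=
  ∃ i, i < nn ∧ PySem.Int.band u ((1 : Int) <<< i) = 0 ∧
    v = PySem.Int.bor u ((1 : Int) <<< i) ∧ pvSafeA s v = true

def pvReach (nn : Nat) (s : String) : Nat → Int → Int → Prop
  | 0, u, w => u = w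
  | k + 1, u, w => ∃ v, pvStep nn s u v ∧ pvReach nn s k v w

theorem pvLorPos (u : Int) (i : Nat) (hu : 0 ≤ u) : 1 ≤ PySem.Int.bor u ((1 : Int) <<< i) := by
  obtain ⟨m, rfl⟩ := Int.eq_ofNat_of_zero_le hu
  rw [show ((1 : Int) <<< i) = ((1 <<< i : Nat) : Int) from rfl, PySem.Int.bor_natCast]
  exact_mod_cast le_trans (Nat.one_le_two_pow.trans_eq (Nat.one_shiftLeft i).symm) Nat.right_le_or

theorem pvStep_pos (nn : Nat) (s : String) (u v : Int) (h : pvStep nn s u v) (hu : 0 ≤ u) :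
    1 ≤ v := by
  obtain ⟨i, _, _, rfl, _⟩ := h
  exact pvLorPos u i hu

theorem pvDfsA_char (nn : Nat) (tgt : Int) (s : String) :
    ∀ (f : Nat) (u : Int),
      pvDfsA nn tgt s f u = true ↔ ∃ k, k ≤ f ∧ pvReach nn s k u tgt := by
  intro f
  induction f with
  | zero =>
    intro u
    constructor
    · intro h
      exact ⟨0, le_refl 0, by simpa [pvDfsA] using h⟩
    · rintro ⟨k, hk, hr⟩
      have hk0 : k = 0 := by omega
      subst hk0
      simpa [pvDfsA] using hr
  | succ f ih =>
    intro u
    by_cases hu : u = tgt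
    · simp only [pvDfsA, hu, BEq.rfl, if_true]
      constructor
      · intro _; exact ⟨0, Nat.zero_le _, rfl⟩
      · intro _; trivial
    · have hne : (u == tgt) = false := by simpa using hu
      simp only [pvDfsA]
      rw [if_neg (by simp [hne]), List.any_eq_true]
      constructor
      · rintro ⟨i, hi, hgi⟩
        rw [List.mem_range] at hi
        by_cases hand : PySem.Int.band u ((1 : Int) <<< i) = 0
        · rw [if_pos (by simpa using hand)] at hgi
          by_cases hsafe : pvSafeA s (PySem.Int.bor u ((1 : Int) <<< i)) = true
          · rw [if_pos hsafe] at hgi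
            obtain ⟨k, hk, hr⟩ := (ih _).1 hgi
            have hstep : pvStep nn s u (PySem.Int.bor u ((1 : Int) <<< i)) :=
              ⟨i, hi, hand, rfl, hsafe⟩
            exact ⟨k + 1, by omega, ⟨PySem.Int.bor u ((1 : Int) <<< i), hstep, hr⟩⟩
          · rw [if_neg hsafe] at hgi
            exact absurd hgi (by simp)
        · rw [if_neg (by simpa using hand)] at hgi
          exact absurd hgi (by simp)
      · rintro ⟨k, hk, hr⟩
        match k, hr with
        | 0, hr => exact absurd hr hu
        | k + 1, ⟨v, hstep, hr'⟩ =>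
          obtain ⟨i, hi, hand, hveq, hsafe⟩ := hstep
          subst hveq
          refine ⟨i, List.mem_range.2 hi, ?_⟩
          rw [if_pos (by simpa using hand), if_pos hsafe]
          exact (ih _).2 ⟨k, by omega, hr'⟩

theorem pvSafeSet_contains (s : String) (v : Int) (hv : 1 ≤ v) :
    PySem.Set.contains (pvSafeSet s) v = pvSafeA s v := by
  rw [Bool.eq_iff_iff, PySem.Set.contains_iff]
  unfold pvSafeSet pvSafeA
  rw [PySem.Set.mem_ofList, List.mem_filterMap, Bool.and_eq_true, decide_eq_true_iff]
  constructor
  · rintro ⟨a, ha, hsome⟩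
    rw [List.mem_range] at ha
    simp only [PySem.Str.len_eq] at ha ⊢
    split at hsome
    · rename_i hg
      have hg' : PySem.Str.pyGet? s (a : Int) = some '0' := by simpa using hg
      have hv' : v = (a : Int) + 1 := by
        have h2 := hsome
        rw [Option.some_inj] at h2
        omega
      subst hv'
      refine ⟨by omega, ?_⟩
      rw [show ((a : Int) + 1 - 1) = (a : Int) by ring, hg']
      simp
    · exact absurd hsome (by simp)
  · rintro ⟨hle, hg⟩
    have hg' : PySem.Str.pyGet? s (v - 1) = some '0' := by simpa using hg
    rw [PySem.Str.len_eq] at hle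
    refine ⟨(v - 1).toNat, ?_, ?_⟩
    · rw [List.mem_range]
      simp only [PySem.Str.len_eq]
      omega
    · rw [if_pos (by rw [show (((v - 1).toNat : Nat) : Int) = v - 1 by omega, hg']; simp),
        Option.some_inj]
      omega

theorem pvNext_mem (nn : Nat) (s : String) (layer : PySem.Set Int)
    (h0 : ∀ u ∈ layer, 0 ≤ u) (v : Int) :
    v ∈ pvNext nn (pvSafeSet s) layer ↔ ∃ u ∈ layer, pvStep nn s u v := by
  unfold pvNext
  rw [PySem.Set.mem_ofList, List.mem_flatMap]
  constructor
  · rintro ⟨u, hu, hv⟩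
    rw [List.mem_filterMap] at hv
    obtain ⟨i, hi, hsome⟩ := hv
    rw [List.mem_range] at hi
    split at hsome
    · rename_i hcond
      rw [Bool.and_eq_true] at hcond
      obtain rfl : v = PySem.Int.bor u ((1 : Int) <<< i) := by
        simpa using hsome.symm
      have hand : PySem.Int.band u ((1 : Int) <<< i) = 0 := by simpa using hcond.1
      refine ⟨u, hu, i, hi, hand, rfl, ?_⟩
      rw [← pvSafeSet_contains s _ (pvLorPos u i (h0 u hu))]
      exact hcond.2
    · exact absurd hsome (by simp)
  · rintro ⟨u, hu, i, hi, hand, rfl, hsafe⟩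
    refine ⟨u, hu, ?_⟩
    rw [List.mem_filterMap]
    refine ⟨i, List.mem_range.2 hi, ?_⟩
    rw [if_pos]
    rw [Bool.and_eq_true]
    refine ⟨by simpa using hand, ?_⟩
    rw [pvSafeSet_contains s _ (pvLorPos u i (h0 u hu))]
    exact hsafe

theorem pvBLoop_char (nn : Nat) (tgt : Int) (s : String) :
    ∀ (f : Nat) (layer : PySem.Set Int), (∀ u ∈ layer, 0 ≤ u) →
      (pvBLoop nn tgt (pvSafeSet s) f layer = true ↔
        ∃ k u, k ≤ f ∧ u ∈ layer ∧ pvReach nn s k u tgt) := by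
  intro f
  induction f with
  | zero =>
    intro layer _
    unfold pvBLoop
    rw [PySem.Set.contains_iff]
    constructor
    · intro h; exact ⟨0, tgt, le_refl 0, h, rfl⟩
    · rintro ⟨k, u, hk, hu, hr⟩
      have hk0 : k = 0 := by omega
      subst hk0
      obtain rfl : u = tgt := hr
      exact hu
  | succ f ih =>
    intro layer h0
    by_cases hc : PySem.Set.contains layer tgt = true
    · simp only [pvBLoop]
      rw [if_pos hc]
      exact ⟨fun _ => ⟨0, tgt, Nat.zero_le _, (PySem.Set.contains_iff _ _).1 hc, rfl⟩,
        fun _ => rfl⟩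
    · simp only [pvBLoop]
      rw [if_neg hc]
      have hnext0 : ∀ v ∈ pvNext nn (pvSafeSet s) layer, 0 ≤ v := by
        intro v hv
        obtain ⟨u, hu, hstep⟩ := (pvNext_mem nn s layer h0 v).1 hv
        exact le_trans zero_le_one (pvStep_pos nn s u v hstep (h0 u hu))
      rw [ih (pvNext nn (pvSafeSet s) layer) hnext0]
      constructor
      · rintro ⟨k, v, hk, hv, hr⟩
        obtain ⟨u, hu, hstep⟩ := (pvNext_mem nn s layer h0 v).1 hv
        exact ⟨k + 1, u, by omega, hu, v, hstep, hr⟩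
      · rintro ⟨k, u, hk, hu, hr⟩
        match k, hr with
        | 0, hr =>
          obtain rfl : u = tgt := hr
          exact absurd ((PySem.Set.contains_iff _ _).2 hu) hc
        | k + 1, ⟨v, hstep, hr'⟩ =>
          exact ⟨k, v, by omega, (pvNext_mem nn s layer h0 v).2 ⟨u, hu, hstep⟩, hr'⟩

-- ===== VERDICT (by name: the statement is the Claim_ definition above) =====
theorem solve_medicine_spec : Claim_equal_solve_medicine := by
  intro n s _ _
  unfold Spec_solve_medicine solve_medicine solve_medicine_alt
  rw [Bool.eq_iff_iff,
    pvDfsA_char n.toNat (((1 : Int) <<< n.toNat) - 1) s n.toNat 0,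
    pvBLoop_char n.toNat (((1 : Int) <<< n.toNat) - 1) s n.toNat (PySem.Set.ofList [0])
      (by intro u hu; rw [PySem.Set.mem_ofList] at hu; simp at hu; omega)]
  constructor
  · rintro ⟨k, hk, hr⟩
    exact ⟨k, 0, hk, by rw [PySem.Set.mem_ofList]; simp, hr⟩
  · rintro ⟨k, u, hk, hu, hr⟩
    rw [PySem.Set.mem_ofList] at hu
    simp at hu
    subst hu
    exact ⟨k, hk, hr⟩
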